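-- pv_equiv track=rewrite | github.com/dusenkot/Python_Algorytmiks | Lab3/zad1.2.py | findPozMaxElement
-- ===== SOURCE A (Python) =====
-- def findPozMaxElement(lista):
--     myMax=lista[0][0]
--     wiersz=0
--     kokumna =0
--     for a in range (len(lista)):
--         for j in range(len(lista[a])):
--             if lista[a][j] > myMax:
--                 myMax = lista[a][j]
--                 wiersz = a
--                 kokumna = j
--     return myMax, wiersz , kokumna
-- ===== SOURCE B (Python) =====
-- def findPozMaxElement(lista):
--     m = lista[0][0]
--     for row in lista:
--         for v in row:
--             if v > m:
--                 m = v
--     for i, row in enumerate(lista):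
--         for j, v in enumerate(row):
--             if v == m:
--                 return m, i, j
-- ===== Notes on version B (the rewrite author's own statement) =====
-- stated objective: alternative
-- what changed: Instead of tracking the max together with its indices in one index-based nested range loop, B makes two value-based passes: first compute the maximum (seeded from lista[0][0]), then return the first row-major position whose element equals it.
import Mathlib
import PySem

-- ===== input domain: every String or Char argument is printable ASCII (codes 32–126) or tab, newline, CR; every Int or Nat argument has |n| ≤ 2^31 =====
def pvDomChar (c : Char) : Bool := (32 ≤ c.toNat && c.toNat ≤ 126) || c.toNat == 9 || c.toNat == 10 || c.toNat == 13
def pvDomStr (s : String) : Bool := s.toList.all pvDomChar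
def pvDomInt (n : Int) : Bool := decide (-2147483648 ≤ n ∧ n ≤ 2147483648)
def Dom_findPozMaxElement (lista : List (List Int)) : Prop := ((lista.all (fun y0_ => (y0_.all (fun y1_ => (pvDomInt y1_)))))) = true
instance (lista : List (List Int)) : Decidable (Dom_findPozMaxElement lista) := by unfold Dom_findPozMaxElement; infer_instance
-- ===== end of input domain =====

-- B replaces A's single index-tracking scan by two value-based passes (compute the max, then find its first position); same O(n) cost, different decomposition.


-- ===== PORT A =====
def findPozMaxElement (lista : List (List Int)) : Int × Int × Int :=
  match PySem.List.pyGet? lista 0 with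
  | none => (0, 0, 0)  -- lista[0] raises IndexError: excluded by Pre_
  | some row0 =>
    match PySem.List.pyGet? row0 0 with
    | none => (0, 0, 0)  -- lista[0][0] raises IndexError: excluded by Pre_
    | some m0 =>
      -- lista[a] / lista[a][j] with indices drawn from range(len(..)) are always in range
      (PySem.List.pyRange 0 (lista.length : Int) 1).foldl
        (fun st a =>
          (PySem.List.pyRange 0 ((PySem.List.pyGetD lista a []).length : Int) 1).foldl
            (fun st j =>
              if PySem.List.pyGetD (PySem.List.pyGetD lista a []) j 0 > st.1
              then (PySem.List.pyGetD (PySem.List.pyGetD lista a []) j 0, a, j) else st)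
            st)
        (m0, 0, 0)

-- ===== PORT B =====
-- first pass helpers are inlined folds; second pass: first (row, col) with value m
def bFindCol (m : Int) (j : Int) : List Int → Option Int
  | [] => none
  | v :: vs => if v == m then some j else bFindCol m (j + 1) vs

def bFindPos (m : Int) (i : Int) : List (List Int) → Int × Int × Int
  | [] => (m, 0, 0)  -- unreachable: m always occurs in lista
  | row :: rest =>
    match bFindCol m 0 row with
    | some j => (m, i, j)
    | none => bFindPos m (i + 1) rest

def findPozMaxElement_alt (lista : List (List Int)) : Int × Int × Int :=
  match PySem.List.pyGet? lista 0 with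
  | none => (0, 0, 0)  -- lista[0] raises IndexError: excluded by Pre_
  | some row0 =>
    match PySem.List.pyGet? row0 0 with
    | none => (0, 0, 0)  -- lista[0][0] raises IndexError: excluded by Pre_
    | some seed =>
      let m := lista.foldl (fun acc row => row.foldl (fun acc v => if v > acc then v else acc) acc) seed
      bFindPos m 0 lista

-- ===== PRECONDITION & SPEC =====
-- Pre_ excludes exactly the inputs where the Python raises IndexError at lista[0][0]:
-- the empty outer list and an empty first row.
def Pre_findPozMaxElement (lista : List (List Int)) : Prop := lista ≠ [] ∧ lista.headI ≠ []
instance (lista : List (List Int)) : Decidable (Pre_findPozMaxElement lista) := by unfold Pre_findPozMaxElement; infer_instance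
def pvWitness_findPozMaxElement : List (List Int) := [[1, 2], [3]]

def Spec_findPozMaxElement (lista : List (List Int)) (out : Int × Int × Int) : Prop := out = findPozMaxElement_alt lista
instance (lista : List (List Int)) (out : Int × Int × Int) : Decidable (Spec_findPozMaxElement lista out) := by unfold Spec_findPozMaxElement; infer_instance

-- ===== CLAIM (what is proved, stated in full; the proofs are below) =====
def Claim_equal_findPozMaxElement : Prop := ∀ (lista : List (List Int)), Dom_findPozMaxElement lista → Pre_findPozMaxElement lista → Spec_findPozMaxElement lista (findPozMaxElement lista)

-- ===== LEMMAS AND PROOFS =====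

-- one update step of A, on an (rowIdx, colIdx, value) triple
def pvStep (st : Int × Int × Int) (t : Int × Int × Int) : Int × Int × Int :=
  if t.2.2 > st.1 then (t.2.2, t.1, t.2.1) else st

-- all (rowIdx, colIdx, value) triples in row-major order, rows numbered from i
def pvTriples (rows : List (List Int)) (i : Int) : List (Int × Int × Int) :=
  (PySem.List.enumerate rows i).flatMap
    (fun ar => (PySem.List.enumerate ar.2 0).map (fun jv => (ar.1, jv.1, jv.2)))

def pvMaxF (l : List (Int × Int × Int)) (m : Int) : Int :=
  l.foldl (fun acc t => if t.2.2 > acc then t.2.2 else acc) m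

def pvFp (l : List (Int × Int × Int)) (M : Int) : Int × Int :=
  match l.find? (fun t => t.2.2 == M) with
  | some t => (t.1, t.2.1)
  | none => (0, 0)

theorem pvMaxF_ge (l : List (Int × Int × Int)) : ∀ m : Int, m ≤ pvMaxF l m := by
  induction l with
  | nil => intro m; simp [pvMaxF]
  | cons t rest ih =>
    intro m
    simp only [pvMaxF, List.foldl_cons]
    by_cases h : t.2.2 > m
    · simp only [if_pos h]
      exact le_trans (le_of_lt h) (ih t.2.2)
    · simp only [if_neg h]; exact ih m

-- characterization of A's fold: the max and the first row-major position achieving it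
theorem pvRunA_char (l : List (Int × Int × Int)) :
    ∀ (m w k : Int), l.foldl pvStep (m, w, k) =
      if m < pvMaxF l m then (pvMaxF l m, pvFp l (pvMaxF l m)) else (m, w, k) := by
  induction l with
  | nil => intro m w k; simp [pvMaxF]
  | cons t rest ih =>
    intro m w k
    have hMcons : pvMaxF (t :: rest) m = pvMaxF rest (if t.2.2 > m then t.2.2 else m) := by
      simp only [pvMaxF, List.foldl_cons]
    rw [List.foldl_cons, hMcons]
    by_cases h : t.2.2 > m
    · have hstep : pvStep (m, w, k) t = (t.2.2, t.1, t.2.1) := by simp [pvStep, h]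
      rw [hstep, ih t.2.2 t.1 t.2.1, if_pos h]
      have hge := pvMaxF_ge rest t.2.2
      have houter : m < pvMaxF rest t.2.2 := lt_of_lt_of_le h hge
      rw [if_pos houter]
      by_cases h2 : t.2.2 < pvMaxF rest t.2.2
      · rw [if_pos h2]
        have hfp : pvFp (t :: rest) (pvMaxF rest t.2.2) = pvFp rest (pvMaxF rest t.2.2) := by
          unfold pvFp
          rw [List.find?_cons_of_neg]
          simp only [beq_iff_eq]
          exact ne_of_lt h2
        rw [hfp]
      · have heq : pvMaxF rest t.2.2 = t.2.2 := le_antisymm (not_lt.mp h2) hge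
        rw [if_neg h2]
        have hfp : pvFp (t :: rest) (pvMaxF rest t.2.2) = (t.1, t.2.1) := by
          unfold pvFp
          rw [List.find?_cons_of_pos (by simp [heq])]
        rw [hfp, heq]
    · have hstep : pvStep (m, w, k) t = (m, w, k) := by simp [pvStep, h]
      have hif : (if t.2.2 > m then t.2.2 else m) = m := if_neg h
      rw [hstep, ih m w k, hif]
      by_cases h2 : m < pvMaxF rest m
      · rw [if_pos h2, if_pos h2]
        have hfp : pvFp (t :: rest) (pvMaxF rest m) = pvFp rest (pvMaxF rest m) := by
          unfold pvFp
          rw [List.find?_cons_of_neg]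
          simp only [beq_iff_eq]
          exact ne_of_lt (lt_of_le_of_lt (not_lt.mp h) h2)
        rw [hfp]
      · rw [if_neg h2, if_neg h2]

-- a fold over range(k, len big) indexing into big equals a fold over the enumerated suffix
theorem pvIdxFold {α β : Type} (f : β → Int → α → β) (d : α) (big : List α) :
    ∀ (k : Nat) (st : β), k ≤ big.length →
      (PySem.List.pyRange (k : Int) (big.length : Int) 1).foldl
          (fun st j => f st j (PySem.List.pyGetD big j d)) st
        = (PySem.List.enumerate (big.drop k) (k : Int)).foldl (fun st jx => f st jx.1 jx.2) st := by
  have main : ∀ (n k : Nat) (st : β), k ≤ big.length → big.length - k = n →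
      (PySem.List.pyRange (k : Int) (big.length : Int) 1).foldl
          (fun st j => f st j (PySem.List.pyGetD big j d)) st
        = (PySem.List.enumerate (big.drop k) (k : Int)).foldl (fun st jx => f st jx.1 jx.2) st := by
    intro n
    induction n with
    | zero =>
      intro k st hk hn
      have hk' : big.length = k := by omega
      rw [PySem.List.pyRange_one_eq_nil (by exact_mod_cast hk'.le)]
      rw [List.drop_of_length_le (le_of_eq hk')]
      simp [PySem.List.enumerate]
    | succ n ih =>
      intro k st hk hn
      have hlt : k < big.length := by omega
      rw [PySem.List.pyRange_one_cons (by exact_mod_cast hlt)]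
      have hdrop : big.drop k = big[k] :: big.drop (k + 1) := (List.getElem_cons_drop hlt).symm
      rw [hdrop, PySem.List.enumerate_cons]
      simp only [List.foldl_cons]
      have hget : PySem.List.pyGetD big (k : Int) d = big[k] := by
        rw [PySem.List.pyGetD_natCast]
        exact List.getD_eq_getElem big d hlt
      rw [hget]
      have : ((k : Int) + 1) = ((k + 1 : Nat) : Int) := by push_cast; ring
      rw [this]
      exact ih (k + 1) _ (by omega) (by omega)
  intro k st hk
  exact main (big.length - k) k st hk rfl

-- B's column search along a row, related to find? on the enumeration
theorem pvFindCol_eq (m : Int) (row : List Int) :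
    ∀ j : Int, bFindCol m j row = ((PySem.List.enumerate row j).find? (fun jv => jv.2 == m)).map Prod.fst := by
  induction row with
  | nil => intro j; rfl
  | cons v vs ih =>
    intro j
    rw [PySem.List.enumerate_cons]
    by_cases h : v = m
    · rw [List.find?_cons_of_pos (by simp [h])]
      simp [bFindCol, h]
    · rw [List.find?_cons_of_neg (by simp [h])]
      simp only [bFindCol, beq_iff_eq, h, if_false]
      exact ih (j + 1)

-- B's position search equals lookup of the first matching triple
theorem pvFindPos_eq (m : Int) (rows : List (List Int)) :
    ∀ i : Int, bFindPos m i rows =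
      match (pvTriples rows i).find? (fun t => t.2.2 == m) with
      | some t => (m, t.1, t.2.1)
      | none => (m, 0, 0) := by
  induction rows with
  | nil => intro i; simp [bFindPos, pvTriples, PySem.List.enumerate]
  | cons row rest ih =>
    intro i
    simp only [pvTriples, PySem.List.enumerate_cons, List.flatMap_cons, List.find?_append, List.find?_map]
    rw [bFindPos, pvFindCol_eq m row 0]
    cases hfind : (PySem.List.enumerate row 0).find? (fun jv => jv.2 == m) with
    | some jv =>
      have : (PySem.List.enumerate row 0).find? ((fun t => t.2.2 == m) ∘ fun jv => (i, jv.1, jv.2)) = some jv := by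
        simpa using hfind
      simp [this]
    | none =>
      have : (PySem.List.enumerate row 0).find? ((fun t => t.2.2 == m) ∘ fun jv => (i, jv.1, jv.2)) = none := by
        simpa using hfind
      simp only [this, Option.map_none, Option.none_or]
      rw [ih (i + 1)]
      rfl

-- the max fold over one enumerated-and-tagged row equals the plain max fold over the row
theorem pvRowMax (i : Int) (row : List Int) :
    ∀ (j seed : Int),
      ((PySem.List.enumerate row j).map (fun jv => (i, jv.1, jv.2))).foldl
          (fun acc t => if t.2.2 > acc then t.2.2 else acc) seed
        = row.foldl (fun acc v => if v > acc then v else acc) seed := by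
  induction row with
  | nil => intro j seed; rfl
  | cons v vs ih =>
    intro j seed
    rw [PySem.List.enumerate_cons, List.map_cons, List.foldl_cons, List.foldl_cons]
    exact ih (j + 1) _

-- the maximum over the triples equals B's nested max fold
theorem pvMaxF_triples (rows : List (List Int)) :
    ∀ (i seed : Int),
      pvMaxF (pvTriples rows i) seed
        = rows.foldl (fun acc row => row.foldl (fun acc v => if v > acc then v else acc) acc) seed := by
  induction rows with
  | nil => intro i seed; rfl
  | cons row rest ih =>
    intro i seed
    have hT : pvTriples (row :: rest) i
        = (PySem.List.enumerate row 0).map (fun jv => (i, jv.1, jv.2)) ++ pvTriples rest (i + 1) := by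
      simp [pvTriples, PySem.List.enumerate_cons]
    rw [hT]
    show (((PySem.List.enumerate row 0).map (fun jv => (i, jv.1, jv.2)) ++ pvTriples rest (i + 1)).foldl
        (fun acc t => if t.2.2 > acc then t.2.2 else acc) seed) = _
    rw [List.foldl_append, pvRowMax i row 0 seed, List.foldl_cons]
    exact ih (i + 1) _

-- A's nested fold equals the fold of pvStep over the triples
theorem pvA_fold_eq (lista : List (List Int)) (st : Int × Int × Int) :
    (PySem.List.pyRange 0 (lista.length : Int) 1).foldl
        (fun st a =>
          (PySem.List.pyRange 0 ((PySem.List.pyGetD lista a []).length : Int) 1).foldl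
            (fun st j =>
              if PySem.List.pyGetD (PySem.List.pyGetD lista a []) j 0 > st.1
              then (PySem.List.pyGetD (PySem.List.pyGetD lista a []) j 0, a, j) else st)
            st)
        st
      = (pvTriples lista 0).foldl pvStep st := by
  have houter := pvIdxFold
      (fun (st : Int × Int × Int) (a : Int) (row : List Int) =>
        (PySem.List.pyRange 0 (row.length : Int) 1).foldl
          (fun st j =>
            if PySem.List.pyGetD row j 0 > st.1 then (PySem.List.pyGetD row j 0, a, j) else st)
          st)
      ([] : List Int) lista 0 st (Nat.zero_le _)
  simp only [Nat.cast_zero, List.drop_zero] at houter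
  rw [houter]
  have hinner : ∀ (a : Int) (row : List Int) (st : Int × Int × Int),
      (PySem.List.pyRange 0 (row.length : Int) 1).foldl
          (fun st j =>
            if PySem.List.pyGetD row j 0 > st.1 then (PySem.List.pyGetD row j 0, a, j) else st)
          st
        = (PySem.List.enumerate row 0).foldl (fun st jv => pvStep st (a, jv.1, jv.2)) st := by
    intro a row st
    have h := pvIdxFold
        (fun (st : Int × Int × Int) (j : Int) (v : Int) => if v > st.1 then (v, a, j) else st)
        (0 : Int) row 0 st (Nat.zero_le _)
    simp only [Nat.cast_zero, List.drop_zero] at h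
    rw [h]; rfl
  simp only [pvTriples, List.foldl_flatMap, List.foldl_map]
  congr 1
  funext b p
  exact hinner p.1 p.2 b

-- ===== VERDICT (by name: the statement is the Claim_ definition above) =====
theorem findPozMaxElement_spec : Claim_equal_findPozMaxElement := by
  intro lista _ hpre
  obtain ⟨hne, hhead⟩ := hpre
  obtain ⟨row0, rest, rfl⟩ : ∃ r rs, lista = r :: rs := by
    cases lista with
    | nil => exact absurd rfl hne
    | cons r rs => exact ⟨r, rs, rfl⟩
  obtain ⟨m0, rtail, rfl⟩ : ∃ v vs, row0 = v :: vs := by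
    cases row0 with
    | nil => exact absurd rfl hhead
    | cons v vs => exact ⟨v, vs, rfl⟩
  unfold Spec_findPozMaxElement findPozMaxElement findPozMaxElement_alt
  have h1 : PySem.List.pyGet? ((m0 :: rtail) :: rest) 0 = some (m0 :: rtail) := by
    simp [PySem.List.pyGet?, PySem.List.pyIdx?]
  have h2 : PySem.List.pyGet? (m0 :: rtail) 0 = some m0 := by
    simp [PySem.List.pyGet?, PySem.List.pyIdx?]
  simp only [h1, h2]
  rw [pvA_fold_eq, pvRunA_char, pvFindPos_eq, ← pvMaxF_triples ((m0 :: rtail) :: rest) 0 m0]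
  have hT : pvTriples ((m0 :: rtail) :: rest) 0
      = (0, 0, m0) :: ((PySem.List.enumerate rtail 1).map (fun jv => ((0 : Int), jv.1, jv.2))
          ++ (PySem.List.enumerate rest 1).flatMap
              (fun ar => (PySem.List.enumerate ar.2 0).map (fun jv => (ar.1, jv.1, jv.2)))) := by
    simp [pvTriples, PySem.List.enumerate_cons]
  set T := pvTriples ((m0 :: rtail) :: rest) 0 with hTdef
  set M := pvMaxF T m0 with hM
  by_cases h : m0 < M
  · rw [if_pos h]
    have hfp : pvFp T M = match T.find? (fun t => t.2.2 == M) with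
        | some t => (t.1, t.2.1) | none => (0, 0) := rfl
    cases hfind : T.find? (fun t => t.2.2 == M) with
    | some t => simp [pvFp, hfind]
    | none => simp [pvFp, hfind]
  · rw [if_neg h]
    have hMeq : M = m0 := le_antisymm (not_lt.mp h) (pvMaxF_ge T m0)
    have hfind : T.find? (fun t => t.2.2 == M) = some (0, 0, m0) := by
      rw [hT, List.find?_cons]
      simp [hMeq]
    rw [hfind, hMeq]
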